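-- pv_equiv track=rewrite | github.com/Dayotar/MTGFinance | MTGFinance.py | complete_dict
-- ===== SOURCE A (Python) =====
-- def complete_dict(position_d, profit_d, count_d):
--     """
--     This function creates a dictionary where the keys are card names and the values are a list of the current position, current profit, and current count.
--     Args : dictionary mapping name to position, dictionary mapping name to profit, dictionary mapping name to count.
--     Returns : dictionary mapping name to [position, profit, count].
--     The position, profit, and count dictionaries can be produced by the above functions.
--     """
--     complete_d = {}
--     for item in position_d:
--         if item not in complete_d:
--             complete_d[item] = [position_d[item]]
--     for item in profit_d:
--         if item not in complete_d:
--             complete_d[item] = [0, profit_d[item]]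
--         else:
--             complete_d[item].append(profit_d[item])
--     for item in count_d:
--         if item not in complete_d:
--             complete_d[item] = [0, 0, count_d[item]]
--         else:
--             complete_d[item].append(count_d[item])
--     return complete_d
-- ===== SOURCE B (Python) =====
-- def complete_dict(position_d, profit_d, count_d):
--     keys = list(position_d)
--     keys += [k for k in profit_d if k not in position_d]
--     keys += [k for k in count_d if k not in position_d and k not in profit_d]
--
--     def value(k):
--         if k in position_d:
--             pad = []
--         elif k in profit_d:
--             pad = [0]
--         else:
--             pad = [0, 0]
--         return pad + [d[k] for d in (position_d, profit_d, count_d) if k in d]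
--
--     return {k: value(k) for k in keys}
-- ===== Notes on version B (the rewrite author's own statement) =====
-- stated objective: alternative
-- what changed: Replaces A's three mutating passes (pad-insert or append into a result dict) by first computing the ordered union of the key lists and then building each key's value in one shot from membership: leading zeros determined by the first dict containing the key, followed by the present values in order.
import Mathlib
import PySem

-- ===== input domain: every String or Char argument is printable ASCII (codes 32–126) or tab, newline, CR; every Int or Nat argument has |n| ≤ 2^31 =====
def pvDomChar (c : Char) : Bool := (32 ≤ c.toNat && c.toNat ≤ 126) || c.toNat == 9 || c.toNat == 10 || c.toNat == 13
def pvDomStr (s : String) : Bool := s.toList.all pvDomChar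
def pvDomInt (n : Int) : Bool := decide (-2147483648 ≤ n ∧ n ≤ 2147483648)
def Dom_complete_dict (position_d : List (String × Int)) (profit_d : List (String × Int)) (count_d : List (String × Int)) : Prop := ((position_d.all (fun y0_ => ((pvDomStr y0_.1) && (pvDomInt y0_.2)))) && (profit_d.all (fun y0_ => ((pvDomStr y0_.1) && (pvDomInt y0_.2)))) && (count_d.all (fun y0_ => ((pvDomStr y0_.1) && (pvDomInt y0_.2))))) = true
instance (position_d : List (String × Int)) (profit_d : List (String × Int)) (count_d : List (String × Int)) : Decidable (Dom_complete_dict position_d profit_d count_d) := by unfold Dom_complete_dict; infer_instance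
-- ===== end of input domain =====

-- B replaces A's three mutating append-passes by first computing the ordered key list
-- and then building each value in one shot from membership (objective: alternative decomposition).

-- ===== PORT A =====
-- three passes over the dicts' keys, mutating a result dict (append / padded insert)
def complete_dict (position_d : List (String × Int)) (profit_d : List (String × Int)) (count_d : List (String × Int)) : List (String × List Int) :=
  let pd := PySem.Dict.ofList position_d
  let fd := PySem.Dict.ofList profit_d
  let cd := PySem.Dict.ofList count_d
  let d1 := pd.keys.foldl (fun d item =>
      if d.contains item = false then d.insert item [pd.getD item 0] else d)
    PySem.Dict.empty
  let d2 := fd.keys.foldl (fun d item =>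
      if d.contains item = false then d.insert item [0, fd.getD item 0]
      else d.modify item [] (fun l => l ++ [fd.getD item 0])) d1
  let d3 := cd.keys.foldl (fun d item =>
      if d.contains item = false then d.insert item [0, 0, cd.getD item 0]
      else d.modify item [] (fun l => l ++ [cd.getD item 0])) d2
  d3.items

-- ===== PORT B =====
-- value of one key: leading zeros from the first dict containing it, then the present values in order
def pvValue (pd fd cd : PySem.Dict String Int) (k : String) : List Int :=
  (if pd.contains k then [] else if fd.contains k then [0] else [0, 0])
  ++ ([pd, fd, cd].filter (fun d => d.contains k)).map (fun d => d.getD k 0)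

def complete_dict_alt (position_d : List (String × Int)) (profit_d : List (String × Int)) (count_d : List (String × Int)) : List (String × List Int) :=
  let pd := PySem.Dict.ofList position_d
  let fd := PySem.Dict.ofList profit_d
  let cd := PySem.Dict.ofList count_d
  let keys := pd.keys ++ fd.keys.filter (fun k => !pd.contains k)
      ++ cd.keys.filter (fun k => !pd.contains k && !fd.contains k)
  (keys.foldl (fun d k => d.insert k (pvValue pd fd cd k)) PySem.Dict.empty).items

-- ===== PRECONDITION & SPEC =====
def Spec_complete_dict (position_d : List (String × Int)) (profit_d : List (String × Int)) (count_d : List (String × Int)) (out : List (String × List Int)) : Prop := out = complete_dict_alt position_d profit_d count_d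
instance (position_d : List (String × Int)) (profit_d : List (String × Int)) (count_d : List (String × Int)) (out : List (String × List Int)) : Decidable (Spec_complete_dict position_d profit_d count_d out) := by unfold Spec_complete_dict; infer_instance

-- ===== CLAIM (what is proved, stated in full; the proofs are below) =====
def Claim_equal_complete_dict : Prop := ∀ (position_d : List (String × Int)) (profit_d : List (String × Int)) (count_d : List (String × Int)), Dom_complete_dict position_d profit_d count_d → Spec_complete_dict position_d profit_d count_d (complete_dict position_d profit_d count_d)

-- ===== LEMMAS AND PROOFS =====

-- A's first pass: over a Nodup key list of fresh keys it appends one (k, [v k]) pair per key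
theorem pv_pass1 (v : String → List Int) (L : List String) (d : PySem.Dict String (List Int))
    (hL : L.Nodup) (hfresh : ∀ k ∈ L, d.contains k = false) :
    (L.foldl (fun d k => if d.contains k = false then d.insert k (v k) else d) d).items
      = d.items ++ L.map (fun k => (k, v k)) := by
  induction L generalizing d with
  | nil => simp
  | cons k L ih =>
    have hk : d.contains k = false := hfresh k (by simp)
    have hL' := hL.of_cons
    have hknotin : k ∉ L := (List.nodup_cons.mp hL).1
    simp only [List.foldl_cons, hk, List.map_cons]
    rw [if_pos trivial]
    rw [ih _ hL' (fun x hx => by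
      rw [PySem.Dict.contains_insert]
      have : x ≠ k := fun h => hknotin (h ▸ hx)
      simp [this, hfresh x (List.mem_cons_of_mem _ hx)])]
    rw [PySem.Dict.items_insert_of_not_contains _ _ hk]
    simp

-- A's append-or-insert pass: appends [v k] to every present key of L, then adds L's fresh keys with value g
theorem pv_pass2 (v : String → Int) (g : String → List Int) (L : List String)
    (d : PySem.Dict String (List Int)) (hL : L.Nodup) (hd : d.keys.Nodup) :
    (L.foldl (fun d k => if d.contains k = false then d.insert k (g k)
        else d.modify k [] (fun l => l ++ [v k])) d).items
      = d.items.map (fun p => if p.1 ∈ L then (p.1, p.2 ++ [v p.1]) else p)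
        ++ (L.filter (fun k => !d.contains k)).map (fun k => (k, g k)) := by
  induction L generalizing d with
  | nil => simp
  | cons k L ih =>
    have hknotin : k ∉ L := (List.nodup_cons.mp hL).1
    have hL' : L.Nodup := hL.of_cons
    simp only [List.foldl_cons]
    by_cases hk : d.contains k = false
    · rw [if_pos hk]
      have hd' : (d.insert k (g k)).keys.Nodup := by
        rw [PySem.Dict.keys_insert_of_not_contains _ _ hk]
        have : k ∉ d.keys := by
          intro h
          rw [PySem.Dict.contains_eq_decide_mem_keys] at hk; simp [h] at hk
        simp [List.nodup_append, hd]
        exact fun a ha h => this (h ▸ ha)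
      rw [ih _ hL' hd']
      rw [PySem.Dict.items_insert_of_not_contains _ _ hk]
      have hknotkeys : k ∉ d.keys := by
        intro h
        rw [PySem.Dict.contains_eq_decide_mem_keys] at hk; simp [h] at hk
      -- filter over L: insert's contains agrees with d's on L (k ∉ L)
      have hfil : L.filter (fun x => !(d.insert k (g k)).contains x)
          = L.filter (fun x => !d.contains x) := by
        apply List.filter_congr
        intro x hx
        have : x ≠ k := fun h => hknotin (h ▸ hx)
        rw [PySem.Dict.contains_insert]
        simp [this]
      rw [hfil]
      have hmapc : List.map (fun p => if p.1 ∈ L then (p.1, p.2 ++ [v p.1]) else p) d.items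
          = List.map (fun p => if p.1 ∈ k :: L then (p.1, p.2 ++ [v p.1]) else p) d.items := by
        apply List.map_congr_left
        intro p hp
        have hpk : p.1 ≠ k := fun h =>
          hknotkeys (h ▸ PySem.Dict.mem_keys_of_mem_items d hp)
        simp [List.mem_cons, hpk]
      simp only [List.map_append, List.filter_cons, hk, Bool.not_false]
      rw [if_pos trivial, hmapc]
      simp [hknotin]
    · rw [if_neg hk]
      have hkt : d.contains k = true := by revert hk; cases d.contains k <;> simp
      have hmodeq : d.modify k [] (fun l => l ++ [v k])
          = d.insert k (d.getD k [] ++ [v k]) := rfl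
      have hd' : (d.modify k [] (fun l => l ++ [v k])).keys.Nodup := by
        rw [PySem.Dict.keys_modify, PySem.Dict.keys_insert_of_contains _ _ hkt]; exact hd
      rw [ih _ hL' hd']
      have hitems : (d.modify k [] (fun l => l ++ [v k])).items
          = d.items.map (fun p => if p.1 = k then (k, p.2 ++ [v k]) else p) := by
        rw [hmodeq, PySem.Dict.items_insert_of_contains _ _ hkt]
        apply List.map_congr_left
        intro p hp
        by_cases hpk : p.1 = k
        · have : d.getD k [] = p.2 := by
            have : (p.1, p.2) ∈ d.items := hp
            rw [← hpk]
            exact PySem.Dict.getD_of_mem_items d this hd []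
          simp [hpk, this]
        · simp [hpk]
      rw [hitems]
      have hfil : L.filter (fun x => !(d.modify k [] (fun l => l ++ [v k])).contains x)
          = L.filter (fun x => !d.contains x) := by
        apply List.filter_congr
        intro x hx
        have : x ≠ k := fun h => hknotin (h ▸ hx)
        rw [PySem.Dict.contains_modify]
        simp [this]
      rw [hfil]
      simp only [List.filter_cons, hkt, Bool.not_true, List.map_map]
      rw [if_neg (by simp)]
      congr 1
      apply List.map_congr_left
      intro p hp
      by_cases hpk : p.1 = k
      · simp [hpk, List.mem_cons, hknotin]
      · simp [hpk, List.mem_cons]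

-- both sides as one statement over the three (Nodup-keyed) dicts built from the inputs
theorem pv_core (pd fd cd : PySem.Dict String Int)
    (h1 : pd.keys.Nodup) (h2 : fd.keys.Nodup) (h3 : cd.keys.Nodup) :
    (cd.keys.foldl (fun d item =>
        if d.contains item = false then d.insert item [0, 0, cd.getD item 0]
        else d.modify item [] (fun l => l ++ [cd.getD item 0]))
      (fd.keys.foldl (fun d item =>
        if d.contains item = false then d.insert item [0, fd.getD item 0]
        else d.modify item [] (fun l => l ++ [fd.getD item 0]))
      (pd.keys.foldl (fun d item =>
        if d.contains item = false then d.insert item [pd.getD item 0] else d)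
        PySem.Dict.empty))).items
    = ((pd.keys ++ fd.keys.filter (fun k => !pd.contains k)
        ++ cd.keys.filter (fun k => !pd.contains k && !fd.contains k)).foldl
        (fun d k => d.insert k (pvValue pd fd cd k)) PySem.Dict.empty).items := by
  have hemp : (PySem.Dict.empty : PySem.Dict String (List Int)).items = [] := rfl
  set d1 := pd.keys.foldl (fun d item =>
      if d.contains item = false then d.insert item [pd.getD item 0] else d)
      PySem.Dict.empty with hd1
  set d2 := fd.keys.foldl (fun d item =>
      if d.contains item = false then d.insert item [0, fd.getD item 0]
      else d.modify item [] (fun l => l ++ [fd.getD item 0])) d1 with hd2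
  -- stage 1 characterisation
  have h1i : d1.items = pd.keys.map (fun k => (k, [pd.getD k 0])) := by
    rw [hd1, pv_pass1 (fun k => [pd.getD k 0]) pd.keys PySem.Dict.empty h1
      (fun k _ => PySem.Dict.contains_empty k), hemp]
    simp
  have hk1 : d1.keys = pd.keys := by
    show d1.items.map (·.1) = _
    rw [h1i]; simp [Function.comp_def]
  have hc1 : ∀ x, d1.contains x = pd.contains x := by
    intro x
    rw [PySem.Dict.contains_eq_decide_mem_keys, PySem.Dict.contains_eq_decide_mem_keys, hk1]
  -- stage 2 characterisation
  have h2i : d2.items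
      = pd.keys.map (fun k => ((fun p => if p.1 ∈ fd.keys then (p.1, p.2 ++ [fd.getD p.1 0]) else p) (k, [pd.getD k 0])))
        ++ (fd.keys.filter (fun k => !pd.contains k)).map (fun k => (k, [0, fd.getD k 0])) := by
    rw [hd2, pv_pass2 (fun k => fd.getD k 0) (fun k => [0, fd.getD k 0]) fd.keys d1 h2
      (hk1 ▸ h1)]
    rw [h1i, List.map_map]
    have hfl : fd.keys.filter (fun k => !d1.contains k)
        = fd.keys.filter (fun k => !pd.contains k) :=
      List.filter_congr (fun x _ => by rw [hc1])
    rw [hfl]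
    rfl
  have hk2 : d2.keys = pd.keys ++ fd.keys.filter (fun k => !pd.contains k) := by
    show d2.items.map (·.1) = _
    rw [h2i]
    simp only [List.map_append, List.map_map]
    congr 1
    · have : ((fun x => (x : String × List Int).1) ∘ fun k =>
          if k ∈ fd.keys then (k, [pd.getD k 0] ++ [fd.getD k 0]) else (k, [pd.getD k 0]))
          = fun (k : String) => k := by
        funext k; by_cases h : k ∈ fd.keys <;> simp [h]
      rw [this, List.map_id']
    · have : ((fun x => (x : String × List Int).1) ∘ fun k => (k, ([0, fd.getD k 0] : List Int)))
          = fun (k : String) => k := by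
        funext k; rfl
      rw [this, List.map_id']
  have hn2 : d2.keys.Nodup := by
    rw [hk2, List.nodup_append]
    refine ⟨h1, h2.filter _, ?_⟩
    intro a ha b hb heq
    have := (List.mem_filter.mp hb).2
    rw [PySem.Dict.contains_eq_decide_mem_keys] at this
    simp [heq ▸ ha] at this
  have hc2 : ∀ x, d2.contains x = (pd.contains x || fd.contains x) := by
    intro x
    rw [PySem.Dict.contains_eq_decide_mem_keys, hk2,
      PySem.Dict.contains_eq_decide_mem_keys, PySem.Dict.contains_eq_decide_mem_keys]
    by_cases hp : x ∈ pd.keys <;>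
      by_cases hf : x ∈ fd.keys <;>
      simp [List.mem_filter, hp, hf, PySem.Dict.contains_eq_decide_mem_keys]
  -- stage 3 characterisation
  rw [pv_pass2 (fun k => cd.getD k 0) (fun k => [0, 0, cd.getD k 0]) cd.keys d2 h3 hn2]
  -- B side
  have hfree : ∀ k ∈ (pd.keys ++ fd.keys.filter (fun k => !pd.contains k)
      ++ cd.keys.filter (fun k => !pd.contains k && !fd.contains k)),
      (PySem.Dict.empty : PySem.Dict String (List Int)).contains k = false :=
    fun k _ => PySem.Dict.contains_empty k
  have hnk : (pd.keys ++ (fd.keys.filter (fun k => !pd.contains k)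
      ++ cd.keys.filter (fun k => !pd.contains k && !fd.contains k))).Nodup := by
    rw [List.nodup_append, List.nodup_append]
    refine ⟨h1, ⟨h2.filter _, h3.filter _, ?_⟩, ?_⟩
    · intro a ha b hb heq
      subst heq
      have h2a := List.mem_filter.mp ha
      have h3a := (List.mem_filter.mp hb).2
      rw [PySem.Dict.contains_eq_decide_mem_keys, PySem.Dict.contains_eq_decide_mem_keys] at h3a
      simp [h2a.1] at h3a
    · intro a ha b hb heq
      subst heq
      rcases List.mem_append.mp hb with hb | hb
      · have := (List.mem_filter.mp hb).2
        rw [PySem.Dict.contains_eq_decide_mem_keys] at this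
        simp [ha] at this
      · have := (List.mem_filter.mp hb).2
        rw [PySem.Dict.contains_eq_decide_mem_keys, PySem.Dict.contains_eq_decide_mem_keys] at this
        simp [ha] at this
  rw [PySem.Dict.items_foldl_insert_fresh _ (fun a => a) (fun k => pvValue pd fd cd k)
      PySem.Dict.empty hfree (by simpa [List.append_assoc] using hnk)]
  rw [h2i, hemp]
  -- align the stage-3 filter with B's
  have hfil3 : cd.keys.filter (fun k => !d2.contains k)
      = cd.keys.filter (fun k => !pd.contains k && !fd.contains k) := by
    apply List.filter_congr
    intro x _
    rw [hc2]
    cases pd.contains x <;> cases fd.contains x <;> rfl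
  rw [hfil3]
  simp only [List.map_append, List.map_map, List.nil_append, List.append_assoc]
  congr 1
  · -- keys of pd
    apply List.map_congr_left
    intro k hk
    have hp : pd.contains k = true := by
      rw [PySem.Dict.contains_eq_decide_mem_keys]; simp [hk]
    have hfb := PySem.Dict.contains_eq_decide_mem_keys fd k
    have hcb := PySem.Dict.contains_eq_decide_mem_keys cd k
    by_cases hf : k ∈ fd.keys <;> by_cases hc : k ∈ cd.keys <;>
      simp [pvValue, List.filter, hp, hfb, hcb, hf, hc]
  congr 1
  · -- keys of fd not in pd
    apply List.map_congr_left
    intro k hk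
    have hm := List.mem_filter.mp hk
    have hp : pd.contains k = false := by
      have := hm.2; cases h : pd.contains k <;> simp [h] at this ⊢
    have hfb : fd.contains k = true := by
      rw [PySem.Dict.contains_eq_decide_mem_keys]; simp [hm.1]
    have hcb := PySem.Dict.contains_eq_decide_mem_keys cd k
    by_cases hc : k ∈ cd.keys <;>
      simp [pvValue, List.filter, hp, hfb, hcb, hc]
  · -- keys of cd in neither
    apply List.map_congr_left
    intro k hk
    have hm := List.mem_filter.mp hk
    have hpf := hm.2
    have hp : pd.contains k = false := by
      cases h : pd.contains k <;> simp [h] at hpf ⊢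
    have hf : fd.contains k = false := by
      cases h : fd.contains k <;> simp [h, hp] at hpf ⊢
    have hcb : cd.contains k = true := by
      rw [PySem.Dict.contains_eq_decide_mem_keys]; simp [hm.1]
    simp [pvValue, List.filter, hp, hf, hcb]

-- ===== VERDICT (by name: the statement is the Claim_ definition above) =====
theorem complete_dict_spec : Claim_equal_complete_dict := by
  intro position_d profit_d count_d _
  show complete_dict position_d profit_d count_d = complete_dict_alt position_d profit_d count_d
  exact pv_core _ _ _ (PySem.Dict.nodup_keys_ofList position_d)
    (PySem.Dict.nodup_keys_ofList profit_d) (PySem.Dict.nodup_keys_ofList count_d)
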